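-- pv_equiv track=rewrite | github.com/selfapplied/antclock | benchmarks/ce3_simplicial_benchmarks.py | _compute_euler_characteristic
-- ===== SOURCE A (Python) =====
-- from typing import List, Tuple, Dict, Any, Optional
--
-- def _compute_euler_characteristic(simplices: List[List[int]]) -> int:
--     """Compute Euler characteristic: V - E + F - ..."""
--     if not simplices:
--         return 0
--
--     # Count simplices by dimension
--     dim_counts = {}
--     for simplex in simplices:
--         dim = len(simplex) - 1
--         dim_counts[dim] = dim_counts.get(dim, 0) + 1
--
--     # Euler characteristic with alternating signs
--     euler = 0
--     sign = 1
--     for dim in sorted(dim_counts.keys()):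
--         euler += sign * dim_counts[dim]
--         sign *= -1
--
--     return euler
-- ===== SOURCE B (Python) =====
-- def _compute_euler_characteristic(simplices):
--     """Sort the dimensions once and scan consecutive runs with an alternating sign
--     (no dict of counts)."""
--     dims = sorted(len(s) - 1 for s in simplices)
--     euler = 0
--     sign = 1
--     i = 0
--     n = len(dims)
--     while i < n:
--         j = i
--         while j < n and dims[j] == dims[i]:
--             j += 1
--         euler += sign * (j - i)
--         sign = -sign
--         i = j
--     return euler
-- ===== Notes on version B (the rewrite author's own statement) =====
-- stated objective: alternative
-- what changed: Replaces the dimension-count dict plus sorted-key loop by sorting the dimension list once and scanning consecutive equal runs with an alternating sign.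
import Mathlib
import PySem

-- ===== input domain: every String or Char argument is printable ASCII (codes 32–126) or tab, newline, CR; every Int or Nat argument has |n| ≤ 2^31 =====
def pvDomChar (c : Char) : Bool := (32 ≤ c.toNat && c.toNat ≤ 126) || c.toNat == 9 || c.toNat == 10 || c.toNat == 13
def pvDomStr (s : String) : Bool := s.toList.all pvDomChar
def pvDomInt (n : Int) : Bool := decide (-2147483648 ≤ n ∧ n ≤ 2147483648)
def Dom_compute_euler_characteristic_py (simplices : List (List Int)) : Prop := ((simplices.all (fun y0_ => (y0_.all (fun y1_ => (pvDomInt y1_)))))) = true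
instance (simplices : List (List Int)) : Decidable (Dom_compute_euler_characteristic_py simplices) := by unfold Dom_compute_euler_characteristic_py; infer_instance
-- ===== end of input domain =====

-- B replaces A's dict of dimension counts by sorting the dimension list once and
-- scanning consecutive equal runs with an alternating sign (objective: alternative).

-- ===== PORT A =====
def compute_euler_characteristic_py (simplices : List (List Int)) : Int :=
  if simplices = [] then 0
  else
    -- dim_counts[dim] = dim_counts.get(dim, 0) + 1 over all simplices
    let dim_counts : PySem.Dict Int Int :=
      simplices.foldl
        (fun d s => d.insert ((s.length : Int) - 1) (d.getD ((s.length : Int) - 1) 0 + 1))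
        PySem.Dict.empty
    -- euler = 0; sign = 1; for dim in sorted(dim_counts.keys()): …
    ((PySem.List.sorted dim_counts.keys (fun x => x) false).foldl
        (fun (p : Int × Int) dim => (p.1 + p.2 * dim_counts.getD dim 0, p.2 * -1))
        (0, 1)).1

-- ===== PORT B =====
-- Source B's inner 'while j < n and dims[j] == dims[i]' advance of j over the current run is
-- ported as takeWhile/dropWhile on the remaining suffix; the outer while-loop is this recursion.
def pvRunsFold : List Int → Int → Int → Int
  | [], euler, _ => euler
  | x :: rest, euler, sign =>
      pvRunsFold (rest.dropWhile (fun y => y == x))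
        (euler + sign * (1 + ((rest.takeWhile (fun y => y == x)).length : Int))) (-sign)
  termination_by xs _ _ => xs.length
  decreasing_by
    exact Nat.lt_succ_of_le (List.length_dropWhile_le _ _)

def compute_euler_characteristic_py_alt (simplices : List (List Int)) : Int :=
  pvRunsFold (PySem.List.sorted (simplices.map (fun s => (s.length : Int) - 1)) (fun x => x) false) 0 1

-- ===== PRECONDITION & SPEC =====
def Spec_compute_euler_characteristic_py (simplices : List (List Int)) (out : Int) : Prop := out = compute_euler_characteristic_py_alt simplices
instance (simplices : List (List Int)) (out : Int) : Decidable (Spec_compute_euler_characteristic_py simplices out) := by unfold Spec_compute_euler_characteristic_py; infer_instance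

-- ===== CLAIM (what is proved, stated in full; the proofs are below) =====
def Claim_equal_compute_euler_characteristic_py : Prop := ∀ (simplices : List (List Int)), Dom_compute_euler_characteristic_py simplices → Spec_compute_euler_characteristic_py simplices (compute_euler_characteristic_py simplices)

-- ===== LEMMAS AND PROOFS =====

-- takeWhile/dropWhile across 'replicate n k ++ L' when no element of L equals k
theorem pv_takeWhile_rep (n : Nat) (k : Int) (L : List Int)
    (h : ∀ y ∈ L, (y == k) = false) :
    (List.replicate n k ++ L).takeWhile (fun y => y == k) = List.replicate n k := by
  induction n with
  | zero =>
    cases L with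
    | nil => simp
    | cons a t => simp [List.takeWhile, h a (by simp)]
  | succ m ih => simp [List.replicate_succ, List.takeWhile, ih]

theorem pv_dropWhile_rep (n : Nat) (k : Int) (L : List Int)
    (h : ∀ y ∈ L, (y == k) = false) :
    (List.replicate n k ++ L).dropWhile (fun y => y == k) = L := by
  induction n with
  | zero =>
    cases L with
    | nil => simp
    | cons a t => simp [List.dropWhile, h a (by simp)]
  | succ m ih => simp [List.replicate_succ, List.dropWhile, ih]

-- counts of a flatMap of replicates over a Nodup list of keys
theorem pv_count_flat (ms : List Int) (D : List Int) (hnd : D.Nodup) (a : Int) :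
    (D.flatMap (fun k => List.replicate (ms.count k) k)).count a
      = if a ∈ D then ms.count a else 0 := by
  induction D with
  | nil => simp
  | cons k t ih =>
    rcases List.nodup_cons.mp hnd with ⟨hk, hnt⟩
    rw [List.flatMap_cons, List.count_append, ih hnt]
    by_cases hak : a = k
    · subst hak
      simp [List.count_replicate, hk]
    · simp only [List.count_replicate, List.mem_cons]
      have : ¬ k = a := fun h => hak h.symm
      simp [hak, this]

-- the flatMap of replicates is a permutation of ms when D holds exactly ms's distinct values
theorem pv_perm_flat (ms : List Int) (D : List Int) (hnd : D.Nodup)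
    (hmem : ∀ x, x ∈ D ↔ x ∈ ms) :
    (D.flatMap (fun k => List.replicate (ms.count k) k)).Perm ms := by
  rw [List.perm_iff_count]
  intro a
  rw [pv_count_flat ms D hnd a]
  by_cases ha : a ∈ D
  · simp [ha]
  · have : a ∉ ms := fun h => ha ((hmem a).mpr h)
    simp [ha, List.count_eq_zero.mpr this]

-- the flatMap of replicates over a strictly increasing key list is ≤-sorted
theorem pv_pairwise_flat (ms : List Int) (D : List Int) (hp : D.Pairwise (· < ·)) :
    (D.flatMap (fun k => List.replicate (ms.count k) k)).Pairwise (· ≤ ·) := by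
  induction D with
  | nil => simp
  | cons k t ih =>
    rcases List.pairwise_cons.mp hp with ⟨hk, hpt⟩
    rw [List.flatMap_cons]
    apply List.pairwise_append.mpr
    refine ⟨List.pairwise_replicate.mpr (Or.inr le_rfl), ih hpt, ?_⟩
    intro a ha b hb
    rcases List.eq_of_mem_replicate ha with rfl
    rcases List.mem_flatMap.mp hb with ⟨z, hz, hb'⟩
    rw [List.eq_of_mem_replicate hb']
    exact le_of_lt (hk z hz)

-- core: scanning runs of the expanded list equals A's fold over the distinct keys
theorem pv_runs_eq_fold (ms : List Int) (D : List Int) (hp : D.Pairwise (· < ·))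
    (hpos : ∀ k ∈ D, 0 < ms.count k) (e s : Int) :
    pvRunsFold (D.flatMap (fun k => List.replicate (ms.count k) k)) e s
      = (D.foldl (fun (p : Int × Int) k => (p.1 + p.2 * (ms.count k : Int), p.2 * -1)) (e, s)).1 := by
  induction D generalizing e s with
  | nil => simp [pvRunsFold]
  | cons k t ih =>
    rcases List.pairwise_cons.mp hp with ⟨hk, hpt⟩
    obtain ⟨m, hm⟩ : ∃ m, ms.count k = m + 1 :=
      ⟨ms.count k - 1, by have := hpos k (by simp); omega⟩
    have hne : ∀ y ∈ t.flatMap (fun k' => List.replicate (ms.count k') k'), (y == k) = false := by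
      intro y hy
      rcases List.mem_flatMap.mp hy with ⟨z, hz, hy'⟩
      rw [List.eq_of_mem_replicate hy']
      simp [ne_of_gt (hk z hz)]
    rw [List.flatMap_cons, hm, List.replicate_succ, List.cons_append]
    rw [pvRunsFold, pv_takeWhile_rep _ _ _ hne, pv_dropWhile_rep _ _ _ hne]
    simp only [List.length_replicate]
    rw [ih hpt (fun a ha => hpos a (List.mem_cons_of_mem _ ha)) (e + s * (1 + (m : Int))) (-s),
        List.foldl_cons, hm]
    have hinit : (e + s * (1 + (m : Int)), -s) = (e + s * (((m + 1 : Nat)) : Int), s * -1) := by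
      rw [Prod.mk.injEq]
      constructor
      · push_cast; ring
      · ring
    rw [hinit]

-- ===== VERDICT (by name: the statement is the Claim_ definition above) =====
theorem compute_euler_characteristic_py_spec : Claim_equal_compute_euler_characteristic_py := by
  intro simplices _
  unfold Spec_compute_euler_characteristic_py compute_euler_characteristic_py
    compute_euler_characteristic_py_alt
  by_cases hnil : simplices = []
  · subst hnil; simp [pvRunsFold, PySem.List.sorted]
  · rw [if_neg hnil]
    have hdict : simplices.foldl
        (fun d s => d.insert ((s.length : Int) - 1) (d.getD ((s.length : Int) - 1) 0 + 1))
        PySem.Dict.empty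
        = PySem.Dict.counter (simplices.map (fun s => (s.length : Int) - 1)) := by
      rw [← PySem.Dict.foldl_insert_getD_add_one_eq_counter, List.foldl_map]
    simp only [hdict, PySem.Dict.keys_counter, PySem.Dict.getD_counter]
    -- abbreviations
    have hnd : (PySem.List.sorted
        (PySem.Set.ofList (simplices.map (fun s => (s.length : Int) - 1))) (fun x => x) false).Nodup :=
      ((PySem.List.sorted_perm _ _ _).nodup_iff).mpr
        (PySem.Set.nodup_ofList _)
    have hmem : ∀ x, x ∈ PySem.List.sorted
        (PySem.Set.ofList (simplices.map (fun s => (s.length : Int) - 1))) (fun x => x) false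
        ↔ x ∈ simplices.map (fun s => (s.length : Int) - 1) := by
      intro x
      rw [PySem.List.mem_sorted, PySem.Set.mem_ofList]
    have hpair := PySem.List.sorted_ofList_pairwise_lt
      (xs := simplices.map (fun s => (s.length : Int) - 1))
    have hpos : ∀ k ∈ PySem.List.sorted
        (PySem.Set.ofList (simplices.map (fun s => (s.length : Int) - 1))) (fun x => x) false,
        0 < (simplices.map (fun s => (s.length : Int) - 1)).count k := by
      intro k hkmem
      exact List.count_pos_iff.mpr ((hmem k).mp hkmem)
    have hsorted : PySem.List.sorted (simplices.map (fun s => (s.length : Int) - 1)) (fun x => x) false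
        = (PySem.List.sorted
            (PySem.Set.ofList (simplices.map (fun s => (s.length : Int) - 1))) (fun x => x) false).flatMap
            (fun k => List.replicate ((simplices.map (fun s => (s.length : Int) - 1)).count k) k) :=
      PySem.List.sorted_id_eq_of_perm_of_pairwise _ _
        (pv_perm_flat _ _ hnd hmem) (pv_pairwise_flat _ _ hpair)
    rw [hsorted, pv_runs_eq_fold _ _ hpair hpos 0 1]
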